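-- pv_equiv track=rewrite | github.com/fractalate/atb-elite | engine/text.py | _streamPositionedCharacters
-- ===== SOURCE A (Python) =====
-- def _streamPositionedCharacters(text: str):
--     x, y = 0, 0
--     for c in text:
--         if c == '\n':
--             x = 0
--             y += 1
--         else:
--             yield x, y, c
--             x += 1
-- ===== SOURCE B (Python) =====
-- def _streamPositionedCharacters(text: str):
--     for y, line in enumerate(text.split('\n')):
--         for x, c in enumerate(line):
--             yield x, y, c
-- ===== Notes on version B (the rewrite author's own statement) =====
-- stated objective: idiomatic
-- what changed: Replaces A's per-character manual (x,y) coordinate bookkeeping with a precomputed split on the newline character followed by a nested enumerate over rows and columns.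
import Mathlib
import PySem

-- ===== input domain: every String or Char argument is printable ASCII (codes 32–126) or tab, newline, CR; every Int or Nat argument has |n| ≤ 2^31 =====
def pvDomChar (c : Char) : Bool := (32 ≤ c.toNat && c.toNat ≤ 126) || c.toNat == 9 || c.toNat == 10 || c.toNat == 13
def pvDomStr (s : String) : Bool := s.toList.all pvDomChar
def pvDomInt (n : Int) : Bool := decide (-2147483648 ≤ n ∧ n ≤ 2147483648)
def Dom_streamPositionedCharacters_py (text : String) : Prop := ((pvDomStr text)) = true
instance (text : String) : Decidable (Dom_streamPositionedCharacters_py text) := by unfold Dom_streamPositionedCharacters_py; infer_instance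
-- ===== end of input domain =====

-- B replaces A's per-character (x,y) bookkeeping with split('\n') plus a nested enumerate over rows and columns (same O(n) cost, different decomposition).


-- ===== PORT A =====
-- the generator loop: state (x, y), yields collected in order
def pvGoA (x y : Int) : List Char → List (Int × Int × String)
  | [] => []
  | c :: cs => if c = '\n' then pvGoA 0 (y + 1) cs else (x, y, String.mk [c]) :: pvGoA (x + 1) y cs

def streamPositionedCharacters_py (text : String) : List (Int × Int × String) :=
  pvGoA 0 0 text.toList

-- ===== PORT B =====
-- text.split('\n') ported as List.splitOn '\n' (single-char separator, keeps empty segments, exactly Python's split); then nested enumerate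
def streamPositionedCharacters_py_alt (text : String) : List (Int × Int × String) :=
  (PySem.List.enumerate (text.toList.splitOn '\n')).flatMap fun yl =>
    (PySem.List.enumerate yl.2).map fun xc => (xc.1, yl.1, String.mk [xc.2])

-- ===== PRECONDITION & SPEC =====
def Spec_streamPositionedCharacters_py (text : String) (out : List (Int × Int × String)) : Prop := out = streamPositionedCharacters_py_alt text
instance (text : String) (out : List (Int × Int × String)) : Decidable (Spec_streamPositionedCharacters_py text out) := by unfold Spec_streamPositionedCharacters_py; infer_instance

-- ===== CLAIM (what is proved, stated in full; the proofs are below) =====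
def Claim_equal_streamPositionedCharacters_py : Prop := ∀ (text : String), Dom_streamPositionedCharacters_py text → Spec_streamPositionedCharacters_py text (streamPositionedCharacters_py text)

-- ===== LEMMAS AND PROOFS =====

lemma pvSplitOn_ne_nil (cs : List Char) : cs.splitOn '\n' ≠ [] :=
  List.splitOnP_ne_nil _ cs

-- B's body as a function of the line list, generalized over the first line's start column x and row y
def pvRows (x y : Int) : List (List Char) → List (Int × Int × String)
  | [] => []
  | l :: ls =>
      (PySem.List.enumerate l x).map (fun xc => (xc.1, y, String.mk [xc.2])) ++
      (PySem.List.enumerate ls (y + 1)).flatMap fun yl =>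
        (PySem.List.enumerate yl.2).map fun xc => (xc.1, yl.1, String.mk [xc.2])

lemma pvRows_splitOn (cs : List Char) : ∀ (x y : Int),
    pvGoA x y cs = pvRows x y (cs.splitOn '\n') := by
  induction cs with
  | nil =>
      intro x y
      simp [pvGoA, pvRows, List.splitOn, List.splitOnP_nil]
  | cons c cs ih =>
      intro x y
      by_cases hc : c = '\n'
      · subst hc
        have hsp : (('\n' :: cs).splitOn '\n') = [] :: cs.splitOn '\n' := by
          simp [List.splitOn, List.splitOnP_cons]
        rw [hsp]
        obtain ⟨l, ls, hls⟩ := List.exists_cons_of_ne_nil (pvSplitOn_ne_nil cs)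
        simp only [pvGoA, ih, hls, pvRows, PySem.List.enumerate_cons,
          List.flatMap_cons, PySem.List.enumerate_nil, List.map_nil, List.nil_append]
        simp
      · have hsp : ((c :: cs).splitOn '\n') = (cs.splitOn '\n').modifyHead (c :: ·) := by
          simp [List.splitOn, List.splitOnP_cons, hc]
        rw [hsp]
        obtain ⟨l, ls, hls⟩ := List.exists_cons_of_ne_nil (pvSplitOn_ne_nil cs)
        simp only [pvGoA, if_neg hc, ih, hls, pvRows, List.modifyHead,
          PySem.List.enumerate_cons, List.map_cons, List.cons_append]

lemma pvAlt_eq_rows (text : String) :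
    streamPositionedCharacters_py_alt text = pvRows 0 0 (text.toList.splitOn '\n') := by
  obtain ⟨l, ls, hls⟩ := List.exists_cons_of_ne_nil (pvSplitOn_ne_nil text.toList)
  simp only [streamPositionedCharacters_py_alt, hls, pvRows,
    PySem.List.enumerate_cons, List.flatMap_cons, zero_add]

-- ===== VERDICT (by name: the statement is the Claim_ definition above) =====
theorem streamPositionedCharacters_py_spec : Claim_equal_streamPositionedCharacters_py := by
  intro text _
  unfold Spec_streamPositionedCharacters_py streamPositionedCharacters_py
  rw [pvAlt_eq_rows, pvRows_splitOn]
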